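-- pv_equiv track=rewrite | github.com/dawidswigut/-Algorithms_and_Data_Structures | Lab_12/text_search.py | naive_method
-- ===== SOURCE A (Python) =====
-- def naive_method(S, W):
--     m = 0
--     i = 0
--     found = 0
--     comparisons = 0
--     length_S = len(S)
--     length_W = len(W)
--
--     while m <= length_S - length_W:
--         comparisons += 1
--         if S[m + i] == W[i]:
--             i += 1
--             if i == length_W:
--                 found += 1
--                 m += 1
--                 i = 0
--         else:
--             m += 1
--             i = 0
--     return found, comparisons
-- ===== SOURCE B (Python) =====
-- def naive_method(S, W):
--     found = 0
--     comparisons = 0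
--     for m in range(len(S) - len(W) + 1):
--         comparisons += 1
--         if S[m] == W[0]:
--             j = 1
--             while j < len(W):
--                 comparisons += 1
--                 if S[m + j] != W[j]:
--                     break
--                 j += 1
--             if j == len(W):
--                 found += 1
--     return found, comparisons
-- ===== Notes on version B (the rewrite author's own statement) =====
-- stated objective: alternative
-- what changed: Replaces A's flat single-index while-loop over the joint state (m,i) with an explicit alignment loop over m plus a separate inner match-extension loop over j, keeping the exact comparison counting.
import Mathlib
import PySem

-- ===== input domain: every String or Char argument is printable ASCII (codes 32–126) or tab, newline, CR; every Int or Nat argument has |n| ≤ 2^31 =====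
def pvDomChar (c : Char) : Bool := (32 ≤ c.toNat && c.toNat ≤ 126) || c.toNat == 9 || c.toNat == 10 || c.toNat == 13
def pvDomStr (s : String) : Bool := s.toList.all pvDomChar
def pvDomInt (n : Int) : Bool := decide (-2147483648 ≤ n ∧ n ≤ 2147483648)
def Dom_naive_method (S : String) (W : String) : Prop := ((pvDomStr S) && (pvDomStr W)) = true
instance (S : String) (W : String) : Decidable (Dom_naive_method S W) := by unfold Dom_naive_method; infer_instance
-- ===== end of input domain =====

-- B restructures A's flat while-loop over the joint state (m, i) into an outer alignment
-- loop plus an inner match-extension loop; same found/comparison counts, same cost.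

-- ===== PORT A =====
-- A's while-loop over state (m, i, found, comparisons), run on a fuel counter (one unit
-- per iteration) only to make it total; the initial fuel below exceeds the number of
-- iterations the Python loop can perform, so the fuel-0 branch is never reached.
-- The indices m+i and i are nonnegative, so Python's S[m+i] / W[i] raises IndexError
-- exactly when the index is ≥ the length: the second guard is that exact condition, and
-- its else-branch is where Python raises (only reachable with W = "", excluded by Pre_).
def pvLoopA (S W : List Char) : Nat → Nat → Nat → Int → Int → Int × Int
  | 0, _, _, found, comp => (found, comp)   -- fuel exhausted: never reached from naive_method
  | fuel + 1, m, i, found, comp =>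
    if (m : Int) ≤ (S.length : Int) - (W.length : Int) then
      if hin : m + i < S.length ∧ i < W.length then
        if S[m + i]'hin.1 = W[i]'hin.2 then
          if i + 1 = W.length then pvLoopA S W fuel (m + 1) 0 (found + 1) (comp + 1)
          else pvLoopA S W fuel m (i + 1) found (comp + 1)
        else pvLoopA S W fuel (m + 1) 0 found (comp + 1)
      else (found, comp + 1)   -- Python raises IndexError here, after comparisons += 1
    else (found, comp)

def naive_method (S : String) (W : String) : Int × Int :=
  pvLoopA S.toList W.toList
    ((S.toList.length + 1) * (W.toList.length + 1) + W.toList.length + 1) 0 0 0 0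

-- ===== PORT B =====
-- inner while-loop of Source B, ported as structural recursion on the remaining iteration
-- count n (the loop runs j = 1, …, len(W)-1, so n = len(W) - j); returns (comparisons,
-- j == len(W)).  As in port A, the bounds test is exactly Python's IndexError condition
-- for S[m+j] / W[j] (its else-branch is unreachable for W ≠ "").
def pvInnerB (S W : List Char) (m : Nat) : Nat → Nat → Int → Int × Bool
  | 0, _, comp => (comp, true)   -- n = 0 ↔ j = len(W): the loop ended without a break
  | n + 1, j, comp =>
    if hin : m + j < S.length ∧ j < W.length then
      if S[m + j]'hin.1 ≠ W[j]'hin.2 then (comp + 1, false)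
      else pvInnerB S W m n (j + 1) (comp + 1)
    else (comp + 1, false)   -- Python raises IndexError here

-- outer for-loop of Source B, ported as structural recursion on the remaining alignment
-- count n (the loop runs m = 0, …, len(S)-len(W), so n counts down from the range length).
def pvOuterB (S W : List Char) : Nat → Nat → Int → Int → Int × Int
  | 0, _, found, comp => (found, comp)   -- range exhausted
  | n + 1, m, found, comp =>
    if hin : m < S.length ∧ 0 < W.length then
      if S[m]'hin.1 = W[0]'hin.2 then
        match pvInnerB S W m (W.length - 1) 1 (comp + 1) with
        | (c, true) => pvOuterB S W n (m + 1) (found + 1) c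
        | (c, false) => pvOuterB S W n (m + 1) found c
      else pvOuterB S W n (m + 1) found (comp + 1)
    else (found, comp + 1)   -- Python raises IndexError here (W = "" only)

def naive_method_alt (S : String) (W : String) : Int × Int :=
  pvOuterB S.toList W.toList
    ((S.toList.length : Int) - (W.toList.length : Int) + 1).toNat 0 0 0

-- ===== PRECONDITION & SPEC =====
-- Pre_ excludes exactly W = "", on which both A and B raise IndexError (W[i] / W[0]).
def Pre_naive_method (S : String) (W : String) : Prop := W ≠ ""
instance (S : String) (W : String) : Decidable (Pre_naive_method S W) := by unfold Pre_naive_method; infer_instance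
def pvWitness_naive_method : String × String := ("abcab", "ab")

def Spec_naive_method (S : String) (W : String) (out : Int × Int) : Prop := out = naive_method_alt S W
instance (S : String) (W : String) (out : Int × Int) : Decidable (Spec_naive_method S W out) := by unfold Spec_naive_method; infer_instance

-- ===== CLAIM (what is proved, stated in full; the proofs are below) =====
def Claim_equal_naive_method : Prop := ∀ (S : String) (W : String), Dom_naive_method S W → Pre_naive_method S W → Spec_naive_method S W (naive_method S W)

-- ===== LEMMAS AND PROOFS =====

-- fuel needed by A's loop from state (m, i): one unit per remaining comparison, padded
def pvAbound (S W : List Char) (m i : Nat) : Nat :=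
  (S.length + 1 - m) * (W.length + 1) + (W.length - i) + 1

theorem pv_abound_step (S W : List Char) (m i : Nat) (hm : m ≤ S.length) :
    pvAbound S W (m + 1) 0 + 1 ≤ pvAbound S W m i := by
  unfold pvAbound
  have h1 : S.length + 1 - m = (S.length - m) + 1 := by omega
  rw [h1, Nat.succ_mul]
  have h2 : S.length + 1 - (m + 1) = S.length - m := by omega
  rw [h2]
  omega

-- A's loop returns the same value under any two sufficient fuels
theorem pv_loopA_irrel (S W : List Char) :
    ∀ f g m i (found comp : Int), pvAbound S W m i ≤ f → pvAbound S W m i ≤ g →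
      pvLoopA S W f m i found comp = pvLoopA S W g m i found comp := by
  intro f
  induction f with
  | zero => intro g m i found comp hf hg; exact absurd hf (by unfold pvAbound; simp)
  | succ f ih =>
    intro g m i found comp hf hg
    cases g with
    | zero => exact absurd hg (by unfold pvAbound; simp)
    | succ g =>
      simp only [pvLoopA]
      split_ifs with h1 h2 h3 h4
      · have hb := pv_abound_step S W m i (by omega)
        exact ih g (m + 1) 0 (found + 1) (comp + 1) (by omega) (by omega)
      · exact ih g m (i + 1) found (comp + 1)
          (by unfold pvAbound at hf ⊢; omega) (by unfold pvAbound at hg ⊢; omega)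
      · have hb := pv_abound_step S W m i (by omega)
        exact ih g (m + 1) 0 found (comp + 1) (by omega) (by omega)
      · rfl
      · rfl

-- A's flat loop in mid-match state (m, j) runs B's inner match-extension loop and then
-- continues at alignment m+1 (with its fuel renormalised via pv_loopA_irrel)
theorem pv_inner_aux (S W : List Char) (m : Nat) (hm : m + W.length ≤ S.length) :
    ∀ n j f (found comp : Int), 1 ≤ j → j + n = W.length → 1 ≤ n → pvAbound S W m j ≤ f →
    pvLoopA S W f m j found comp =
      (match pvInnerB S W m n j comp with
       | (c, true) => pvLoopA S W (pvAbound S W (m + 1) 0) (m + 1) 0 (found + 1) c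
       | (c, false) => pvLoopA S W (pvAbound S W (m + 1) 0) (m + 1) 0 found c) := by
  intro n
  induction n with
  | zero => intro j f found comp h1 h2 h3 hf; omega
  | succ n ih =>
    intro j f found comp h1 h2 h3 hf
    have hj : j < W.length := by omega
    cases f with
    | zero => exact absurd hf (by unfold pvAbound; simp)
    | succ f =>
      rw [pvLoopA, pvInnerB]
      rw [if_pos (show (m : Int) ≤ (S.length : Int) - (W.length : Int) by omega)]
      rw [dif_pos (show m + j < S.length ∧ j < W.length from ⟨by omega, hj⟩)]
      rw [dif_pos (show m + j < S.length ∧ j < W.length from ⟨by omega, hj⟩)]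
      by_cases heq : S[m + j]'(by omega) = W[j]'hj
      · rw [if_pos heq, if_neg (show ¬(S[m + j]'(by omega) ≠ W[j]'hj) by simpa using heq)]
        by_cases hend : j + 1 = W.length
        · rw [if_pos hend]
          obtain rfl : n = 0 := by omega
          rw [pvInnerB]
          have hb := pv_abound_step S W m j (by omega)
          exact pv_loopA_irrel S W f (pvAbound S W (m + 1) 0) (m + 1) 0 (found + 1)
            (comp + 1) (by omega) le_rfl
        · rw [if_neg hend]
          exact ih (j + 1) f found (comp + 1) (by omega) (by omega) (by omega)
            (by unfold pvAbound at hf ⊢; omega)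
      · rw [if_neg heq, if_pos (show S[m + j]'(by omega) ≠ W[j]'hj from heq)]
        have hb := pv_abound_step S W m j (by omega)
        exact pv_loopA_irrel S W f (pvAbound S W (m + 1) 0) (m + 1) 0 found
          (comp + 1) (by omega) le_rfl

-- A's loop at an alignment boundary (i = 0) equals B's outer loop with the matching
-- remaining-alignment count
theorem pv_main_aux (S W : List Char) (hW : 1 ≤ W.length) :
    ∀ (n m f : Nat) (found comp : Int),
      ((S.length : Int) - (W.length : Int) + 1 - (m : Int)).toNat = n →
      pvAbound S W m 0 ≤ f →
      pvLoopA S W f m 0 found comp = pvOuterB S W n m found comp := by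
  intro n
  induction n with
  | zero =>
    intro m f found comp hn hf
    cases f with
    | zero => exact absurd hf (by unfold pvAbound; simp)
    | succ f =>
      rw [pvLoopA, pvOuterB, if_neg (show ¬((m : Int) ≤ (S.length : Int) - (W.length : Int)) by omega)]
  | succ n ih =>
    intro m f found comp hn hf
    cases f with
    | zero => exact absurd hf (by unfold pvAbound; simp)
    | succ f =>
      have hg : (m : Int) ≤ (S.length : Int) - (W.length : Int) := by omega
      have hm : m + W.length ≤ S.length := by omega
      rw [pvLoopA, pvOuterB, if_pos hg]
      rw [dif_pos (show m + 0 < S.length ∧ 0 < W.length from ⟨by omega, by omega⟩)]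
      rw [dif_pos (show m < S.length ∧ 0 < W.length from ⟨by omega, by omega⟩)]
      have hS0 : S[m + 0]'(by omega) = S[m]'(by omega) := by simp
      by_cases heq : S[m]'(by omega) = W[0]'(by omega)
      · rw [if_pos (hS0 ▸ heq), if_pos heq]
        by_cases hend : 0 + 1 = W.length
        · rw [if_pos hend]
          have hlen : W.length - 1 = 0 := by omega
          rw [hlen, pvInnerB]
          exact ih (m + 1) f (found + 1) (comp + 1) (by omega)
            (by have := pv_abound_step S W m 0 (by omega); omega)
        · rw [if_neg hend]
          simp only [Nat.zero_add]
          rw [pv_inner_aux S W m hm (W.length - 1) 1 f found (comp + 1) le_rfl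
            (by omega) (by omega) (by unfold pvAbound at hf ⊢; omega)]
          rcases pvInnerB S W m (W.length - 1) 1 (comp + 1) with ⟨c, b⟩
          cases b <;>
            exact ih (m + 1) (pvAbound S W (m + 1) 0) _ c (by omega) le_rfl
      · rw [if_neg (hS0 ▸ heq), if_neg heq]
        exact ih (m + 1) f found (comp + 1) (by omega)
          (by have := pv_abound_step S W m 0 (by omega); omega)

-- ===== VERDICT (by name: the statement is the Claim_ definition above) =====
theorem naive_method_spec : Claim_equal_naive_method := by
  intro S W _ hpre
  unfold Spec_naive_method naive_method naive_method_alt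
  have hW : 1 ≤ W.toList.length := by
    rcases h' : W.toList with _ | ⟨a, l⟩
    · exact absurd (by simpa [String.toList_eq_nil_iff] using h') hpre
    · simp
  exact pv_main_aux S.toList W.toList hW _ 0 _ 0 0 (by simp)
    (by unfold pvAbound; simp)
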